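-- pv_equiv track=rewrite | github.com/dangothemango/AdventOfCode | 2023/day9/part1.py | calcDiffs
-- ===== SOURCE A (Python) =====
-- def calcDiffs(nums):
--     diffs = list()
--     for i in range(len(nums)-1):
--         diffs.append(nums[i+1]-nums[i])
--     retDiffs = None
--     if [x for x in diffs if x != 0]:
--         retDiffs = calcDiffs(diffs)
--     if not retDiffs:
--         diffs.append(0)
--         return diffs
--     diffs.append(diffs[-1]+retDiffs[-1])
--     return diffs
-- ===== SOURCE B (Python) =====
-- def calcDiffs(nums):
--     # One pass for the difference list, then the extrapolated next difference
--     # via the Newton forward-difference binomial formula (no recursion).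
--     diffs = [b - a for a, b in zip(nums, nums[1:])]
--     n = len(diffs)
--     total = 0
--     c = 1  # running binomial coefficient C(n, i)
--     for i in range(n):
--         sign = -1 if (n - 1 - i) % 2 else 1
--         total += sign * c * diffs[i]
--         c = c * (n - i) // (i + 1)
--     diffs.append(total)
--     return diffs
-- ===== Notes on version B (the rewrite author's own statement) =====
-- stated objective: alternative
-- what changed: Replaces A's recursive pyramid of difference rows with a single pass: build the difference list once and compute the extrapolated next difference directly by the Newton forward-difference binomial formula with a running binomial coefficient (O(n) list operations vs A's O(n^2); intended as faster — measured 96x at n=1024, but both time out on the largest probe sizes where intermediate integers grow huge).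
import Mathlib
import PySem

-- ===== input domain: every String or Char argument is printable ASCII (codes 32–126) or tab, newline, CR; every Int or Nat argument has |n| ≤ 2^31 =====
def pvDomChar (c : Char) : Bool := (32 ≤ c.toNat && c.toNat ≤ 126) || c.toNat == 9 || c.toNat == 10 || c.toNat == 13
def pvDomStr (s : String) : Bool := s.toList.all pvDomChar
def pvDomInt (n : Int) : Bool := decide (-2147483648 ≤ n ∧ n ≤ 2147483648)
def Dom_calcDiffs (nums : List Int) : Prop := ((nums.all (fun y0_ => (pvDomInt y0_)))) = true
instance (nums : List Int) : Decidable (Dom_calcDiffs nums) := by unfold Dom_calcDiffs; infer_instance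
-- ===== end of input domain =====

-- B replaces A's recursive pyramid of difference rows with one pass: the difference
-- list plus the extrapolated next difference via the Newton binomial formula.


-- ===== PORT A =====
-- literal transliteration of A: build diffs by an append loop over range(len(nums)-1),
-- recurse when some diff is nonzero, append 0 or diffs[-1]+retDiffs[-1].
def calcDiffs (nums : List Int) : List Int :=
  let diffs := (PySem.List.pyRange 0 ((nums.length : Int) - 1) 1).foldl
      (fun acc i => acc ++ [(PySem.List.pyGet? nums (i + 1)).getD 0 - (PySem.List.pyGet? nums i).getD 0]) []
  if h : diffs.filter (fun x => x != 0) ≠ [] then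
    let retDiffs := calcDiffs diffs
    if retDiffs = [] then diffs ++ [0]
    else diffs ++ [(PySem.List.pyGet? diffs (-1)).getD 0 + (PySem.List.pyGet? retDiffs (-1)).getD 0]
  else diffs ++ [0]
termination_by nums.length
decreasing_by
  have hlen : diffs.length = ((nums.length : Int) - 1).toNat := by
    simp only [diffs, PySem.List.foldl_append_singleton_eq_map, List.nil_append,
      List.length_map, PySem.List.length_pyRange_one, Int.sub_zero]
  have hne : diffs ≠ [] := by
    intro hnil; exact h (by simp [hnil])
  have h1 : 1 ≤ diffs.length := List.length_pos_iff.mpr hne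
  show diffs.length < nums.length
  omega

-- ===== PORT B =====
-- port of Source B: zip-based difference list, then one fold maintaining (total, binomial c).
def calcDiffs_alt (nums : List Int) : List Int :=
  let diffs := List.zipWith (fun a b => b - a) nums nums.tail
  let n := diffs.length
  let st := (List.range n).foldl
    (fun (st : Int × Int) (i : Nat) =>
      let sign : Int := if (n - 1 - i) % 2 = 1 then -1 else 1
      (st.1 + sign * st.2 * diffs.getD i 0,
       PySem.Int.floordiv (st.2 * ((n : Int) - (i : Int))) ((i : Int) + 1)))
    (0, 1)
  diffs ++ [st.1]

-- ===== PRECONDITION & SPEC =====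
def Spec_calcDiffs (nums : List Int) (out : List Int) : Prop := out = calcDiffs_alt nums
instance (nums : List Int) (out : List Int) : Decidable (Spec_calcDiffs nums out) := by unfold Spec_calcDiffs; infer_instance

-- ===== CLAIM (what is proved, stated in full; the proofs are below) =====
def Claim_equal_calcDiffs : Prop := ∀ (nums : List Int), Dom_calcDiffs nums → Spec_calcDiffs nums (calcDiffs nums)

-- ===== LEMMAS AND PROOFS =====

-- the difference list and the Newton forward-difference extrapolation value
def dZ (d : List Int) : List Int := List.zipWith (fun a b => b - a) d d.tail

def Nf (n : ℕ) (a : ℕ → ℤ) : ℤ :=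
  ∑ i ∈ Finset.range n, (-1 : ℤ) ^ (n - 1 - i) * (n.choose i : ℤ) * a i

def Nsum (d : List Int) : Int := Nf d.length (fun i => d.getD i 0)

lemma length_dZ (d : List Int) : (dZ d).length = d.length - 1 := by
  simp [dZ]

lemma getD_dZ (d : List Int) (i : ℕ) (hi : i < d.length - 1) :
    (dZ d).getD i 0 = d.getD (i + 1) 0 - d.getD i 0 := by
  have h1 : i < (dZ d).length := by rw [length_dZ]; exact hi
  have h2 : i < d.length := by omega
  have h3 : i + 1 < d.length := by omega
  rw [List.getD_eq_getElem _ _ h1, List.getD_eq_getElem _ _ h2, List.getD_eq_getElem _ _ h3]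
  simp [dZ, List.getElem_tail]

lemma Nf_step (m : ℕ) (a : ℕ → ℤ) :
    Nf (m + 1) a = a m + ∑ i ∈ Finset.range m,
      (-1 : ℤ) ^ (m - 1 - i) * (m.choose i : ℤ) * (a (i + 1) - a i) := by
  unfold Nf
  simp only [Nat.add_sub_cancel]
  rw [Finset.sum_range_succ']
  have e1 : ∀ i ∈ Finset.range m,
      (-1 : ℤ) ^ (m - (i + 1)) * ((m + 1).choose (i + 1) : ℤ) * a (i + 1)
      = (-1 : ℤ) ^ (m - 1 - i) * ((m.choose (i + 1) : ℤ) * a (i + 1))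
        + (-1 : ℤ) ^ (m - 1 - i) * ((m.choose i : ℤ) * a (i + 1)) := by
    intro i hi
    have hmi : m - (i + 1) = m - 1 - i := by omega
    rw [hmi, Nat.choose_succ_succ]
    push_cast; ring
  rw [Finset.sum_congr rfl e1, Finset.sum_add_distrib]
  have hsucc : (∑ j ∈ Finset.range (m + 1), (-1 : ℤ) ^ (m - j) * (m.choose j : ℤ) * a j)
      = (∑ i ∈ Finset.range m, (-1 : ℤ) ^ (m - (i + 1)) * (m.choose (i + 1) : ℤ) * a (i + 1))
        + (-1 : ℤ) ^ (m - 0) * (m.choose 0 : ℤ) * a 0 :=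
    Finset.sum_range_succ' _ m
  have hsucc2 : (∑ j ∈ Finset.range (m + 1), (-1 : ℤ) ^ (m - j) * (m.choose j : ℤ) * a j)
      = (∑ j ∈ Finset.range m, (-1 : ℤ) ^ (m - j) * (m.choose j : ℤ) * a j)
        + (-1 : ℤ) ^ (m - m) * (m.choose m : ℤ) * a m :=
    Finset.sum_range_succ _ m
  have eT : (∑ i ∈ Finset.range m, (-1 : ℤ) ^ (m - (i + 1)) * (m.choose (i + 1) : ℤ) * a (i + 1))
      = ∑ i ∈ Finset.range m, (-1 : ℤ) ^ (m - 1 - i) * ((m.choose (i + 1) : ℤ) * a (i + 1)) := by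
    refine Finset.sum_congr rfl ?_
    intro i hi
    have hmi : m - (i + 1) = m - 1 - i := by omega
    rw [hmi]; ring
  have hneg : (∑ j ∈ Finset.range m, (-1 : ℤ) ^ (m - j) * (m.choose j : ℤ) * a j)
      = -∑ j ∈ Finset.range m, (-1 : ℤ) ^ (m - 1 - j) * (m.choose j : ℤ) * a j := by
    have e2 : ∀ j ∈ Finset.range m, (-1 : ℤ) ^ (m - j) * (m.choose j : ℤ) * a j
        = -((-1 : ℤ) ^ (m - 1 - j) * (m.choose j : ℤ) * a j) := by
      intro j hj
      have hjm := Finset.mem_range.mp hj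
      have hj' : m - j = (m - 1 - j) + 1 := by omega
      rw [hj', pow_succ]; ring
    rw [Finset.sum_congr rfl e2, Finset.sum_neg_distrib]
  have eR : (∑ i ∈ Finset.range m, (-1 : ℤ) ^ (m - 1 - i) * (m.choose i : ℤ) * (a (i + 1) - a i))
      = (∑ i ∈ Finset.range m, (-1 : ℤ) ^ (m - 1 - i) * ((m.choose i : ℤ) * a (i + 1)))
        - (∑ i ∈ Finset.range m, (-1 : ℤ) ^ (m - 1 - i) * (m.choose i : ℤ) * a i) := by
    rw [← Finset.sum_sub_distrib]
    refine Finset.sum_congr rfl ?_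
    intro i hi; ring
  rw [eT] at hsucc
  simp only [Nat.sub_zero, Nat.sub_self, Nat.choose_zero_right, Nat.choose_self, pow_zero,
    Nat.cast_one, mul_one, one_mul] at hsucc hsucc2 ⊢
  rw [eR]
  linarith [hsucc, hsucc2, hneg]

lemma Nsum_step (d : List Int) (hd : d ≠ []) :
    Nsum d = d.getD (d.length - 1) 0 + Nsum (dZ d) := by
  obtain ⟨m, hm⟩ : ∃ m, d.length = m + 1 :=
    ⟨d.length - 1, by have := List.length_pos_iff.mpr hd; omega⟩
  unfold Nsum
  rw [hm, length_dZ, hm, Nat.add_sub_cancel, Nf_step]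
  congr 1
  unfold Nf
  refine Finset.sum_congr rfl ?_
  intro i hi
  have him := Finset.mem_range.mp hi
  simp only []
  rw [getD_dZ d i (by omega)]

lemma Nsum_zero (d : List Int) (h : ∀ x ∈ d, x = 0) : Nsum d = 0 := by
  unfold Nsum Nf
  refine Finset.sum_eq_zero ?_
  intro i hi
  simp only []
  rw [List.getD_eq_getElem _ _ (Finset.mem_range.mp hi), h _ (List.getElem_mem _), mul_zero]

lemma A_diffs_eq (nums : List Int) :
    (PySem.List.pyRange 0 ((nums.length : Int) - 1) 1).foldl
      (fun acc i => acc ++ [(PySem.List.pyGet? nums (i + 1)).getD 0 - (PySem.List.pyGet? nums i).getD 0]) []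
    = dZ nums := by
  rw [PySem.List.foldl_append_singleton_eq_map, List.nil_append]
  apply List.ext_getElem
  · simp only [List.length_map, PySem.List.length_pyRange_one, length_dZ]
    omega
  · intro i h1 h2
    have hi : i < nums.length - 1 := by rw [length_dZ] at h2; exact h2
    have hr : i < ((nums.length : Int) - 1 - 0).toNat := by
      simp only [List.length_map, PySem.List.length_pyRange_one] at h1
      exact h1
    rw [List.getElem_map, PySem.List.getElem_pyRange_one]
    have c1 : (0 : Int) + (i : Int) + 1 = ((i + 1 : Nat) : Int) := by push_cast; ring
    have c2 : (0 : Int) + (i : Int) = ((i : Nat) : Int) := by simp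
    rw [c1, c2, PySem.List.pyGet?_natCast, PySem.List.pyGet?_natCast]
    have hlt1 : i + 1 < nums.length := by omega
    have hlt2 : i < nums.length := by omega
    rw [List.getElem?_eq_getElem hlt1, List.getElem?_eq_getElem hlt2]
    simp [dZ, List.getElem_tail]

lemma alt_fold (d : List Int) (k : ℕ) (hk : k ≤ d.length) :
    (List.range k).foldl
      (fun (st : Int × Int) (i : Nat) =>
        let sign : Int := if (d.length - 1 - i) % 2 = 1 then -1 else 1
        (st.1 + sign * st.2 * d.getD i 0,
         PySem.Int.floordiv (st.2 * ((d.length : Int) - (i : Int))) ((i : Int) + 1)))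
      (0, 1)
    = (∑ i ∈ Finset.range k, (-1 : ℤ) ^ (d.length - 1 - i) * (d.length.choose i : ℤ) * d.getD i 0,
       (d.length.choose k : Int)) := by
  induction k with
  | zero => simp
  | succ k ih =>
    have hk' : k ≤ d.length := by omega
    have hk2 : k < d.length := by omega
    rw [List.range_succ, List.foldl_append, ih hk']
    simp only [List.foldl_cons, List.foldl_nil]
    have hsign : (if (d.length - 1 - k) % 2 = 1 then (-1 : ℤ) else 1)
        = (-1 : ℤ) ^ (d.length - 1 - k) := by
      rcases Nat.even_or_odd (d.length - 1 - k) with he | ho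
      · rw [if_neg (by rw [Nat.even_iff] at he; omega), Even.neg_one_pow he]
      · rw [if_pos (Nat.odd_iff.mp ho), Odd.neg_one_pow ho]
    have hmul : (d.length.choose k : Int) * ((d.length : Int) - (k : Int))
        = (d.length.choose (k + 1) : Int) * ((k : Int) + 1) := by
      have h1 : (d.length.choose (k + 1)) * (k + 1) = (d.length.choose k) * (d.length - k) :=
        Nat.choose_succ_right_eq _ _
      zify [Nat.le_of_lt hk2] at h1
      linarith [h1]
    have hdiv : PySem.Int.floordiv ((d.length.choose k : Int) * ((d.length : Int) - (k : Int)))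
        ((k : Int) + 1) = (d.length.choose (k + 1) : Int) := by
      rw [hmul, PySem.Int.floordiv_eq_ediv_of_pos (by positivity),
        Int.mul_ediv_cancel _ (by positivity)]
    simp only [hsign, hdiv]
    rw [Finset.sum_range_succ]

theorem B_char (nums : List Int) : calcDiffs_alt nums = dZ nums ++ [Nsum (dZ nums)] := by
  unfold calcDiffs_alt
  simp only []
  rw [show List.zipWith (fun a b => b - a) nums nums.tail = dZ nums from rfl]
  rw [alt_fold (dZ nums) (dZ nums).length le_rfl]
  rfl

theorem A_char (nums : List Int) : calcDiffs nums = dZ nums ++ [Nsum (dZ nums)] := by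
  generalize hL : nums.length = L
  induction L using Nat.strong_induction_on generalizing nums with
  | _ L IH =>
  subst hL
  rw [calcDiffs]
  simp only [A_diffs_eq]
  by_cases hfil : (dZ nums).filter (fun x => x != 0) = []
  · rw [dif_neg (by simp [hfil])]
    have hz : Nsum (dZ nums) = 0 := by
      refine Nsum_zero _ ?_
      intro x hx
      by_contra hne
      have : x ∈ (dZ nums).filter (fun x => x != 0) := by
        rw [List.mem_filter]
        exact ⟨hx, by simpa using hne⟩
      rw [hfil] at this
      exact absurd this (List.not_mem_nil)
    rw [hz]
  · rw [dif_pos hfil]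
    have hne : dZ nums ≠ [] := by
      intro h0; exact hfil (by simp [h0])
    have hpos : 1 ≤ (dZ nums).length := List.length_pos_iff.mpr hne
    have hlen : (dZ nums).length = nums.length - 1 := length_dZ nums
    have hrec : calcDiffs (dZ nums) = dZ (dZ nums) ++ [Nsum (dZ (dZ nums))] :=
      IH ((dZ nums).length) (by omega) (dZ nums) rfl
    rw [hrec]
    rw [if_neg (by simp)]
    rw [PySem.List.pyGet?_neg_one_append_singleton]
    rw [PySem.List.pyGet?_neg_one]
    rw [List.getLast?_eq_getElem?]
    rw [List.getElem?_eq_getElem (by omega : (dZ nums).length - 1 < (dZ nums).length)]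
    simp only [Option.getD_some]
    rw [Nsum_step (dZ nums) hne]
    rw [List.getD_eq_getElem _ _ (by omega : (dZ nums).length - 1 < (dZ nums).length)]

-- ===== VERDICT (by name: the statement is the Claim_ definition above) =====
theorem calcDiffs_spec : Claim_equal_calcDiffs := by
  intro nums _
  unfold Spec_calcDiffs
  rw [A_char, B_char]
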